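-- pv_equiv track=rewrite | github.com/htang7415/Max-Handbook | modules/ai-agents/evaluation/paired-run-significance/python/paired_run_significance.py | paired_outcome_counts
-- ===== SOURCE A (Python) =====
-- def paired_outcome_counts(baseline: list[bool], candidate: list[bool]) -> dict[str, int]:
--     if not baseline or not candidate:
--         raise ValueError("baseline and candidate must be non-empty")
--     if len(baseline) != len(candidate):
--         raise ValueError("baseline and candidate must have the same length")
--
--     counts = {
--         "both_success": 0,
--         "baseline_only": 0,
--         "candidate_only": 0,
--         "both_fail": 0,
--     }
--     for baseline_ok, candidate_ok in zip(baseline, candidate):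
--         if baseline_ok and candidate_ok:
--             counts["both_success"] += 1
--         elif baseline_ok and not candidate_ok:
--             counts["baseline_only"] += 1
--         elif not baseline_ok and candidate_ok:
--             counts["candidate_only"] += 1
--         else:
--             counts["both_fail"] += 1
--     return counts
-- ===== SOURCE B (Python) =====
-- def paired_outcome_counts(baseline: list[bool], candidate: list[bool]) -> dict[str, int]:
--     if not baseline or not candidate:
--         raise ValueError("baseline and candidate must be non-empty")
--     if len(baseline) != len(candidate):
--         raise ValueError("baseline and candidate must have the same length")
--
--     n = len(baseline)
--     nb = sum(1 for b in baseline if b)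
--     nc = sum(1 for c in candidate if c)
--     both = sum(1 for b, c in zip(baseline, candidate) if b and c)
--     # inclusion-exclusion: the other three cells follow from the marginals
--     return {
--         "both_success": both,
--         "baseline_only": nb - both,
--         "candidate_only": nc - both,
--         "both_fail": n - nb - nc + both,
--     }
-- ===== Notes on version B (the rewrite author's own statement) =====
-- stated objective: alternative
-- what changed: Replaces the single loop with a four-way branch updating dict counters by three independent counts (successes in baseline, in candidate, and joint successes) and derives the other three cells of the 2x2 table arithmetically by inclusion-exclusion from the marginals.
import Mathlib
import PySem

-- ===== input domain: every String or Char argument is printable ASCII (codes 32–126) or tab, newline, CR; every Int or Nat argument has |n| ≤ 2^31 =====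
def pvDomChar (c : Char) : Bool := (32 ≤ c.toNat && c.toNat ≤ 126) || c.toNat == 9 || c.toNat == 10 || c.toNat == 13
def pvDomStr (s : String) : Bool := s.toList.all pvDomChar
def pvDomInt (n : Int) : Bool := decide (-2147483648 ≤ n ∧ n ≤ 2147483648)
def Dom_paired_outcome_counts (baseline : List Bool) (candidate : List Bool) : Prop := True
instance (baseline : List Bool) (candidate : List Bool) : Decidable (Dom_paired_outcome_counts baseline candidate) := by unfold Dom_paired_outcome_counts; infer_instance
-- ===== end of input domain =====

-- B replaces the single four-way branching loop by three independent success counts and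
-- inclusion-exclusion arithmetic for the remaining cells of the 2x2 table (alternative decomposition).

-- ===== PORT A =====
-- A's loop body: counts[<key>] += 1 on an always-present key, via Dict.modify.
def pvStepA (d : PySem.Dict String Int) (p : Bool × Bool) : PySem.Dict String Int :=
  if p.1 && p.2 then d.modify "both_success" 0 (· + 1)
  else if p.1 && !p.2 then d.modify "baseline_only" 0 (· + 1)
  else if !p.1 && p.2 then d.modify "candidate_only" 0 (· + 1)
  else d.modify "both_fail" 0 (· + 1)

def paired_outcome_counts (baseline : List Bool) (candidate : List Bool) : List (String × Int) :=
  let counts : PySem.Dict String Int :=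
    PySem.Dict.mk [("both_success", 0), ("baseline_only", 0), ("candidate_only", 0), ("both_fail", 0)]
  let counts := (baseline.zip candidate).foldl pvStepA counts
  counts.items

-- ===== PORT B =====
-- B: three generator-sum counts (success marginals and joint successes), then inclusion-exclusion.
def paired_outcome_counts_alt (baseline : List Bool) (candidate : List Bool) : List (String × Int) :=
  let n : Int := baseline.length
  let nb : Int := baseline.countP (fun b => b)
  let nc : Int := candidate.countP (fun c => c)
  let both : Int := (baseline.zip candidate).countP (fun p => p.1 && p.2)
  [("both_success", both), ("baseline_only", nb - both),
   ("candidate_only", nc - both), ("both_fail", n - nb - nc + both)]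

-- ===== PRECONDITION & SPEC =====
-- Pre_ excludes exactly the inputs where A raises ValueError: an empty list or unequal lengths.
def Pre_paired_outcome_counts (baseline : List Bool) (candidate : List Bool) : Prop :=
  baseline ≠ [] ∧ candidate ≠ [] ∧ baseline.length = candidate.length
instance (baseline : List Bool) (candidate : List Bool) : Decidable (Pre_paired_outcome_counts baseline candidate) := by unfold Pre_paired_outcome_counts; infer_instance
def pvWitness_paired_outcome_counts : List Bool × List Bool := ([true, false], [true, true])

def Spec_paired_outcome_counts (baseline : List Bool) (candidate : List Bool) (out : List (String × Int)) : Prop := out = paired_outcome_counts_alt baseline candidate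
instance (baseline : List Bool) (candidate : List Bool) (out : List (String × Int)) : Decidable (Spec_paired_outcome_counts baseline candidate out) := by unfold Spec_paired_outcome_counts; infer_instance

-- ===== CLAIM =====
def Claim_equal_paired_outcome_counts : Prop := ∀ (baseline : List Bool) (candidate : List Bool), Dom_paired_outcome_counts baseline candidate → Pre_paired_outcome_counts baseline candidate → Spec_paired_outcome_counts baseline candidate (paired_outcome_counts baseline candidate)

-- ===== LEMMAS AND PROOFS =====

-- A's literal 4-key dict, abbreviated for the invariant (proof helper).
def pvD (a b c d : Int) : PySem.Dict String Int :=
  PySem.Dict.mk [("both_success", a), ("baseline_only", b), ("candidate_only", c), ("both_fail", d)]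

lemma pv_stepTT (a b c d : Int) : pvStepA (pvD a b c d) (true, true) = pvD (a+1) b c d := by
  simp [pvStepA, pvD, PySem.Dict.modify, PySem.Dict.get?, PySem.Dict.getD, PySem.Dict.insert]
lemma pv_stepTF (a b c d : Int) : pvStepA (pvD a b c d) (true, false) = pvD a (b+1) c d := by
  simp [pvStepA, pvD, PySem.Dict.modify, PySem.Dict.get?, PySem.Dict.getD, PySem.Dict.insert]
lemma pv_stepFT (a b c d : Int) : pvStepA (pvD a b c d) (false, true) = pvD a b (c+1) d := by
  simp [pvStepA, pvD, PySem.Dict.modify, PySem.Dict.get?, PySem.Dict.getD, PySem.Dict.insert]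
lemma pv_stepFF (a b c d : Int) : pvStepA (pvD a b c d) (false, false) = pvD a b c (d+1) := by
  simp [pvStepA, pvD, PySem.Dict.modify, PySem.Dict.get?, PySem.Dict.getD, PySem.Dict.insert]

-- Invariant: A's fold, expressed through the four cell counts of the zipped list.
lemma pv_loop_counts (ps : List (Bool × Bool)) (a b c d : Int) :
    (ps.foldl pvStepA (pvD a b c d)).items
    =
    [("both_success", a + ps.countP (fun p => p.1 && p.2)),
     ("baseline_only", b + ps.countP (fun p => p.1 && !p.2)),
     ("candidate_only", c + ps.countP (fun p => !p.1 && p.2)),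
     ("both_fail", d + ps.countP (fun p => !p.1 && !p.2))] := by
  induction ps generalizing a b c d with
  | nil => simp [pvD]
  | cons p rest ih =>
    obtain ⟨pb, pc⟩ := p
    cases pb <;> cases pc <;>
      simp only [List.foldl_cons, pv_stepTT, pv_stepTF, pv_stepFT, pv_stepFF, List.countP_cons] <;>
      rw [ih] <;> push_cast <;> simp <;> ring_nf

-- The success marginals over the two lists equal component counts over the zip (equal lengths).
lemma pv_countP_fst (bs cs : List Bool) (h : bs.length = cs.length) :
    bs.countP (fun b => b) = (bs.zip cs).countP (fun p => p.1) := by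
  induction bs generalizing cs with
  | nil => simp
  | cons x xs ih =>
    cases cs with
    | nil => simp at h
    | cons y ys => simp [List.countP_cons, ih ys (by simpa using h)]

lemma pv_countP_snd (bs cs : List Bool) (h : bs.length = cs.length) :
    cs.countP (fun c => c) = (bs.zip cs).countP (fun p => p.2) := by
  induction bs generalizing cs with
  | nil => cases cs with | nil => simp | cons y ys => simp at h
  | cons x xs ih =>
    cases cs with
    | nil => simp at h
    | cons y ys => simp [List.countP_cons, ih ys (by simpa using h)]

-- Each marginal and the total decompose over the four cells.
lemma pv_cells (ps : List (Bool × Bool)) :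
    ps.countP (fun p => p.1) = ps.countP (fun p => p.1 && p.2) + ps.countP (fun p => p.1 && !p.2)
    ∧ ps.countP (fun p => p.2) = ps.countP (fun p => p.1 && p.2) + ps.countP (fun p => !p.1 && p.2)
    ∧ ps.length = ps.countP (fun p => p.1 && p.2) + ps.countP (fun p => p.1 && !p.2)
        + ps.countP (fun p => !p.1 && p.2) + ps.countP (fun p => !p.1 && !p.2) := by
  induction ps with
  | nil => simp
  | cons p rest ih =>
    obtain ⟨h1, h2, h3⟩ := ih
    obtain ⟨pb, pc⟩ := p
    cases pb <;> cases pc <;> simp [h1, h2, h3] <;> omega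

-- ===== VERDICT =====
theorem paired_outcome_counts_spec : Claim_equal_paired_outcome_counts := by
  intro baseline candidate _ hpre
  obtain ⟨_, _, hlen⟩ := hpre
  show _ = _
  unfold paired_outcome_counts paired_outcome_counts_alt
  rw [show (PySem.Dict.mk [("both_success", (0:Int)), ("baseline_only", 0), ("candidate_only", 0), ("both_fail", 0)]) = pvD 0 0 0 0 from rfl,
    pv_loop_counts]
  obtain ⟨h1, h2, h3⟩ := pv_cells (baseline.zip candidate)
  have hz : (baseline.zip candidate).length = baseline.length := by
    simp [List.length_zip, hlen]
  rw [pv_countP_fst baseline candidate hlen] at *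
  rw [pv_countP_snd baseline candidate hlen] at *
  simp only [List.cons.injEq, Prod.mk.injEq, and_true, true_and]
  refine ⟨by omega, by omega, by omega, by omega⟩
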